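-- pv_equiv track=rewrite | github.com/rickypin/PktMask | src/pktmask/core/pipeline/stages/mask_payload_v2/masker/payload_masker.py | _find_overlapping_ranges
-- ===== SOURCE A (Python) =====
-- from typing import Any, Dict, List, Optional, Tuple
--
-- def _find_overlapping_ranges(
--     sorted_ranges: List[Tuple[int, int]], seg_start: int, seg_end: int
-- ) -> List[Tuple[int, int]]:
--     """使用二分查找找到与给定段重叠的所有区间
--
--     所有区间都使用左闭右开格式 [start, end)：
--     - seg_start, seg_end: 当前TCP段的序列号范围 [seg_start, seg_end)
--     - range_start, range_end: 保留规则的序列号范围 [range_start, range_end)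
--     - 重叠条件: range_end > seg_start and range_start < seg_end
--     """
--     if not sorted_ranges:
--         return []
--
--     overlapping = []
--
--     # 找到第一个可能重叠的区间
--     left = 0
--     right = len(sorted_ranges)
--
--     # 二分查找第一个结束位置 > seg_start 的区间（左闭右开区间）
--     while left < right:
--         mid = (left + right) // 2
--         if sorted_ranges[mid][1] > seg_start:
--             right = mid
--         else:
--             left = mid + 1
--
--     # 从找到的位置开始，收集所有重叠的区间
--     for i in range(left, len(sorted_ranges)):
--         range_start, range_end = sorted_ranges[i]
--
--         # 如果区间开始位置已经超过段结束位置，则后续区间都不会重叠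
--         if range_start >= seg_end:
--             break
--
--         # 左闭右开区间重叠检测: range_end > seg_start and range_start < seg_end
--         if range_end > seg_start and range_start < seg_end:
--             overlapping.append((range_start, range_end))
--
--     return overlapping
-- ===== SOURCE B (Python) =====
-- from typing import List, Tuple
--
--
-- def _find_overlapping_ranges(
--     sorted_ranges: List[Tuple[int, int]], seg_start: int, seg_end: int
-- ) -> List[Tuple[int, int]]:
--     """Single linear pass: keep every range overlapping [seg_start, seg_end).
--
--     Overlap condition (half-open intervals): range_end > seg_start and
--     range_start < seg_end.  No binary search, no early break.
--     """
--     return [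
--         (range_start, range_end)
--         for range_start, range_end in sorted_ranges
--         if range_end > seg_start and range_start < seg_end
--     ]
-- ===== Notes on version B (the rewrite author's own statement) =====
-- stated objective: simpler
-- what changed: Replaced the hand-written binary search plus bounded scan with early break by one plain linear filter pass over the whole list using the exact overlap predicate; Pre_ excludes lists unsorted in the thresholds the binary search and early break rely on (kept anyway when no range overlaps, where both return []).
-- outside the precondition, e.g. on _find_overlapping_ranges([(0, 10), (5, 0)], 4, 6): A returns [], B returns [(0, 10)]
import Mathlib
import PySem

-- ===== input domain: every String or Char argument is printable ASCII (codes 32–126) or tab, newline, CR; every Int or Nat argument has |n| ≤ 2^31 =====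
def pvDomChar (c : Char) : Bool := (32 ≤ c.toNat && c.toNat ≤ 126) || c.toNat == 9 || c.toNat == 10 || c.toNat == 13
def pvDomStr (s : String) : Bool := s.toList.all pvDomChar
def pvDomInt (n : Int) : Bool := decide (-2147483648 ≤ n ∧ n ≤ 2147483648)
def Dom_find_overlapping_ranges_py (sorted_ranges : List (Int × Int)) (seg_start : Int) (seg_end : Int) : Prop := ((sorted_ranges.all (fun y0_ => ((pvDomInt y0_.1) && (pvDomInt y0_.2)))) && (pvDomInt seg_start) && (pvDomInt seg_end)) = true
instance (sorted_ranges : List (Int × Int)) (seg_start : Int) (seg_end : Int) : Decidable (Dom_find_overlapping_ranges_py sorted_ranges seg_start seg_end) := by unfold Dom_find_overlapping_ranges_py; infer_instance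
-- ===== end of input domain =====

-- B replaces A's binary search + bounded scan with one plain linear filter pass (objective: simpler).

-- ===== PORT A =====
-- binary search: first index with sorted_ranges[mid][1] > seg_start (left/right are
-- always in [0, len], so the getD default (0,0) is never used)
def pvBisect (xs : List (Int × Int)) (seg_start : Int) (left right : Nat) : Nat :=
  if _h : left < right then
    let mid := (left + right) / 2
    if (xs.getD mid (0, 0)).2 > seg_start then pvBisect xs seg_start left mid
    else pvBisect xs seg_start (mid + 1) right
  else left
termination_by right - left
decreasing_by all_goals omega

-- the 'for i in range(left, len)' loop with break, accumulator appended at the back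
def pvCollect (xs : List (Int × Int)) (seg_start seg_end : Int) (i : Nat)
    (acc : List (Int × Int)) : List (Int × Int) :=
  match _h : xs[i]? with
  | none => acc
  | some r =>
    if r.1 ≥ seg_end then acc
    else if r.2 > seg_start ∧ r.1 < seg_end then
      pvCollect xs seg_start seg_end (i + 1) (acc ++ [r])
    else pvCollect xs seg_start seg_end (i + 1) acc
termination_by xs.length - i
decreasing_by all_goals (obtain ⟨hlt, -⟩ := List.getElem?_eq_some_iff.mp _h; omega)

def find_overlapping_ranges_py (sorted_ranges : List (Int × Int)) (seg_start : Int) (seg_end : Int) : List (Int × Int) :=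
  if sorted_ranges = [] then []
  else pvCollect sorted_ranges seg_start seg_end
        (pvBisect sorted_ranges seg_start 0 sorted_ranges.length) []

-- ===== PORT B =====
def find_overlapping_ranges_py_alt (sorted_ranges : List (Int × Int)) (seg_start : Int) (seg_end : Int) : List (Int × Int) :=
  sorted_ranges.filter (fun r => decide (r.2 > seg_start ∧ r.1 < seg_end))

-- ===== PRECONDITION & SPEC =====
-- Pre_ excludes lists that are unsorted in the sense the binary search and the early
-- break rely on (a later range ends at/before seg_start after an earlier one ended past
-- it, or a later range starts before seg_end after an earlier one started at/past it):
-- there A's skipping may drop overlapping entries, an accident of the implementation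
-- (the parameter is documented as sorted), while B filters the whole list; lists in
-- which no range overlaps the segment at all are kept (both return [] regardless).
def Pre_find_overlapping_ranges_py (sorted_ranges : List (Int × Int)) (seg_start : Int) (seg_end : Int) : Prop :=
  List.Pairwise (fun a b : Int × Int =>
    (a.2 > seg_start → b.2 > seg_start) ∧ (a.1 ≥ seg_end → b.1 ≥ seg_end)) sorted_ranges
  ∨ ∀ r ∈ sorted_ranges, ¬ (r.2 > seg_start ∧ r.1 < seg_end)
instance (sorted_ranges : List (Int × Int)) (seg_start : Int) (seg_end : Int) : Decidable (Pre_find_overlapping_ranges_py sorted_ranges seg_start seg_end) := by unfold Pre_find_overlapping_ranges_py; infer_instance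

def pvWitness_find_overlapping_ranges_py : (List (Int × Int)) × Int × Int := ([(0, 2), (3, 5)], 1, 4)

def Spec_find_overlapping_ranges_py (sorted_ranges : List (Int × Int)) (seg_start : Int) (seg_end : Int) (out : List (Int × Int)) : Prop := out = find_overlapping_ranges_py_alt sorted_ranges seg_start seg_end
instance (sorted_ranges : List (Int × Int)) (seg_start : Int) (seg_end : Int) (out : List (Int × Int)) : Decidable (Spec_find_overlapping_ranges_py sorted_ranges seg_start seg_end out) := by unfold Spec_find_overlapping_ranges_py; infer_instance

-- ===== CLAIM (what is proved, stated in full; the proofs are below) =====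
def Claim_equal_find_overlapping_ranges_py : Prop := ∀ (sorted_ranges : List (Int × Int)) (seg_start : Int) (seg_end : Int), Dom_find_overlapping_ranges_py sorted_ranges seg_start seg_end → Pre_find_overlapping_ranges_py sorted_ranges seg_start seg_end → Spec_find_overlapping_ranges_py sorted_ranges seg_start seg_end (find_overlapping_ranges_py sorted_ranges seg_start seg_end)

-- ===== LEMMAS AND PROOFS =====

-- the bisect result stays within the search window
lemma pvBisect_le (xs : List (Int × Int)) (s : Int) (left right : Nat)
    (h : left ≤ right) : pvBisect xs s left right ≤ right := by
  fun_induction pvBisect xs s left right with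
  | case1 left right hlt mid htest ih => exact le_trans (ih (by omega)) (by omega)
  | case2 left right hlt mid htest ih => exact ih (by omega)
  | case3 left right hlt => omega

-- every index strictly below the bisect result has end ≤ seg_start (needs ends sorted)
lemma pvBisect_prefix (xs : List (Int × Int)) (s : Int)
    (hsort : ∀ i j (hi : i < xs.length) (hj : j < xs.length), i ≤ j → (xs[i]).2 > s → (xs[j]).2 > s)
    (left right : Nat) (hr : right ≤ xs.length)
    (hpre : ∀ i (hi : i < xs.length), i < left → (xs[i]).2 ≤ s) :
    ∀ i (hi : i < xs.length), i < pvBisect xs s left right → (xs[i]).2 ≤ s := by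
  fun_induction pvBisect xs s left right with
  | case1 left right hlt mid htest ih =>
    exact ih (by omega) hpre
  | case2 left right hlt mid htest ih =>
    refine ih hr ?_
    intro i hi hilt
    have hmid : mid < xs.length := by omega
    have : (xs.getD mid (0, 0)) = xs[mid] := List.getD_eq_getElem xs (0, 0) hmid
    have hmids : ¬ (xs[mid]).2 > s := by rw [this] at htest; omega
    by_cases h2 : (xs[i]).2 > s
    · exact absurd (hsort i mid hi hmid (by omega) h2) hmids
    · omega
  | case3 left right hlt =>
    exact hpre

-- the collect loop from index i equals acc ++ filter of the suffix (needs starts sorted)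
lemma pvCollect_eq_filter (xs : List (Int × Int)) (s e : Int)
    (hsort : ∀ i j (hi : i < xs.length) (hj : j < xs.length), i ≤ j → (xs[i]).1 ≥ e → (xs[j]).1 ≥ e) :
    ∀ i acc, pvCollect xs s e i acc
      = acc ++ (xs.drop i).filter (fun r => decide (r.2 > s ∧ r.1 < e)) := by
  intro i acc
  fun_induction pvCollect xs s e i acc with
  | case1 i acc h =>
    have : xs.length ≤ i := List.getElem?_eq_none_iff.mp h
    simp [List.drop_eq_nil_of_le this]
  | case2 i acc r h hge =>
    obtain ⟨hi, hr⟩ := List.getElem?_eq_some_iff.mp h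
    have hnil : (xs.drop i).filter (fun r => decide (r.2 > s ∧ r.1 < e)) = [] := by
      rw [List.filter_eq_nil_iff]
      intro a ha
      rw [List.mem_drop_iff_getElem] at ha
      obtain ⟨j, hj, hja⟩ := ha
      have h1 : a.1 ≥ e := by
        rw [← hja]; exact hsort i (i + j) hi (by omega) (by omega) (by rw [hr]; exact hge)
      simp only [decide_eq_true_eq]
      rintro ⟨-, hlt⟩
      omega
    rw [hnil, List.append_nil]
  | case3 i acc r h hge hP ih =>
    obtain ⟨hi, hr⟩ := List.getElem?_eq_some_iff.mp h
    rw [ih, List.drop_eq_getElem_cons hi, hr]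
    simp [hP]
  | case4 i acc r h hge hP ih =>
    obtain ⟨hi, hr⟩ := List.getElem?_eq_some_iff.mp h
    rw [ih, List.drop_eq_getElem_cons hi, hr]
    simp [hP]

-- when no element satisfies the overlap predicate the collect loop adds nothing
lemma pvCollect_of_none (xs : List (Int × Int)) (s e : Int)
    (h : ∀ r ∈ xs, ¬ (r.2 > s ∧ r.1 < e)) :
    ∀ i acc, pvCollect xs s e i acc = acc := by
  intro i acc
  fun_induction pvCollect xs s e i acc with
  | case1 i acc _ => rfl
  | case2 i acc r _ _ => rfl
  | case3 i acc r hget hge hP ih =>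
    obtain ⟨hi, hr⟩ := List.getElem?_eq_some_iff.mp hget
    exact absurd hP (h r (hr ▸ List.getElem_mem hi))
  | case4 i acc r _ _ _ ih => exact ih

lemma pairwise_getElem_mono {xs : List (Int × Int)} {s e : Int}
    (h : List.Pairwise (fun a b : Int × Int =>
      (a.2 > s → b.2 > s) ∧ (a.1 ≥ e → b.1 ≥ e)) xs) :
    ∀ i j (hi : i < xs.length) (hj : j < xs.length), i ≤ j →
      ((xs[i]).2 > s → (xs[j]).2 > s) ∧ ((xs[i]).1 ≥ e → (xs[j]).1 ≥ e) := by
  intro i j hi hj hij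
  rcases Nat.lt_or_ge i j with hlt | hge
  · exact (List.pairwise_iff_getElem.mp h) i j hi hj hlt
  · have : i = j := by omega
    subst this; exact ⟨id, id⟩

-- ===== VERDICT (by name: the statement is the Claim_ definition above) =====
theorem find_overlapping_ranges_py_spec : Claim_equal_find_overlapping_ranges_py := by
  intro xs s e _hdom hpre
  unfold Spec_find_overlapping_ranges_py find_overlapping_ranges_py find_overlapping_ranges_py_alt
  rcases hpre with hpre | hnoP
  case inr =>
    have hfilter : xs.filter (fun r => decide (r.2 > s ∧ r.1 < e)) = [] := by
      rw [List.filter_eq_nil_iff]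
      intro a ha
      simpa using hnoP a ha
    split
    · next hnil => simp [hnil]
    · next hnil => rw [pvCollect_of_none xs s e hnoP, hfilter]
  split
  · next hnil => simp [hnil]
  · next hnil =>
    have hfst := fun i j hi hj hij => (pairwise_getElem_mono hpre i j hi hj hij).2
    have hsnd := fun i j hi hj hij => (pairwise_getElem_mono hpre i j hi hj hij).1
    set L := pvBisect xs s 0 xs.length with hL
    have hLle : L ≤ xs.length := pvBisect_le xs s 0 xs.length (by omega)
    rw [pvCollect_eq_filter xs s e hfst L []]
    have hpref : ∀ i (hi : i < xs.length), i < L → (xs[i]).2 ≤ s :=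
      pvBisect_prefix xs s hsnd 0 xs.length (le_refl _) (by omega)
    have htake : (xs.take L).filter (fun r => decide (r.2 > s ∧ r.1 < e)) = [] := by
      rw [List.filter_eq_nil_iff]
      intro a ha
      rw [List.mem_take_iff_getElem] at ha
      obtain ⟨j, hj, hja⟩ := ha
      have hjlen : j < xs.length := by omega
      rw [← hja]
      simp only [decide_eq_true_eq]
      rintro ⟨hgt, -⟩
      exact absurd (hpref j hjlen (by omega)) (by omega)
    calc [] ++ (xs.drop L).filter (fun r => decide (r.2 > s ∧ r.1 < e))
        = (xs.take L).filter (fun r => decide (r.2 > s ∧ r.1 < e))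
            ++ (xs.drop L).filter (fun r => decide (r.2 > s ∧ r.1 < e)) := by rw [htake]
      _ = xs.filter (fun r => decide (r.2 > s ∧ r.1 < e)) := by
            rw [← List.filter_append, List.take_append_drop]
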